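-- pv_equiv track=rewrite | github.com/fbghgus123/algorithm | python/백준/분할정복/2512_예산.py | check
-- ===== SOURCE A (Python) =====
-- def check(region, m):
--     a = m // len(region)
--     tmp = []
--     for i in region:
--         if a > i:
--             m -= i
--         else:
--             tmp.append(i)
--     if len(region) == len(tmp) or len(tmp) == 0:
--         return tmp, m
--     return check(tmp, m)
-- ===== SOURCE B (Python) =====
-- def _first_geq(s, a, lo):
--     # leftmost index >= lo whose value is >= a (s sorted); like bisect_left(s, a, lo)
--     hi = len(s)
--     while lo < hi:
--         mid = (lo + hi) // 2
--         if s[mid] < a: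
--             lo = mid + 1
--         else:
--             hi = mid
--     return lo
--
--
-- def check(region, m):
--     n = len(region)
--     s = sorted(region)
--     pref = [0]
--     for x in s:
--         pref.append(pref[-1] + x)
--     idx = 0
--     while idx < n:
--         a = m // (n - idx)
--         j = _first_geq(s, a, idx)
--         if j == idx:
--             break
--         m -= pref[j] - pref[idx]
--         idx = j
--     if idx == n:
--         return [], m
--     t = s[idx]
--     return [x for x in region if x >= t], m
-- ===== Notes on version B (the rewrite author's own statement) =====
-- stated objective: alternative
-- what changed: B sorts the list once and replays the removal rounds on the sorted array with prefix sums and a hand-written binary search, then reconstructs the survivors with one filter pass, instead of A's recursive rebuild-and-rescan of the remaining list each round.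
-- crash fix: On the empty list A raises ZeroDivisionError (m // len(region)); B returns ([], m). — e.g. on check([], 7): A raises ZeroDivisionError, B returns ([], 7)
import Mathlib
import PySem

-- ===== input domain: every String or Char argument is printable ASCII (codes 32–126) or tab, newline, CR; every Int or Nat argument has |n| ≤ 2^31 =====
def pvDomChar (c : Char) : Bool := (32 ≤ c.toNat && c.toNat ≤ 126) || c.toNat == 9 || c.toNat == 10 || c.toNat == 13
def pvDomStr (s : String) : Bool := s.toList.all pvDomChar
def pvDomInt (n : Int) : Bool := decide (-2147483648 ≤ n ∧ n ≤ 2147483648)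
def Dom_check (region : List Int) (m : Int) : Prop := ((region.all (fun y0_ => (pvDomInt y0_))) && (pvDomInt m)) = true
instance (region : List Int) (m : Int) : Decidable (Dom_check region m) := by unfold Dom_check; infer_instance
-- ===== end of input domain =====

-- B sorts once and replays the removal rounds on the sorted array with prefix sums and
-- binary search instead of rescanning the whole list every round.

-- ===== PORT A =====
-- the for-loop of A: walks region, subtracting removed budgets from m, appending kept ones to tmp
def checkLoop (a : Int) : List Int → List Int → Int → List Int × Int
  | [], tmp, m => (tmp, m)
  | i :: rest, tmp, m =>
      if a > i then checkLoop a rest tmp (m - i)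
      else checkLoop a rest (tmp ++ [i]) m

-- fuel = len(region) bounds the recursion depth (each recursive call strictly shrinks the list)
def checkGo : Nat → List Int → Int → List Int × Int
  | 0, _, m => ([], m)
  | fuel + 1, region, m =>
      let a := PySem.Int.floordiv m region.length
      let r := checkLoop a region [] m
      if region.length = r.1.length ∨ r.1.length = 0 then r
      else checkGo fuel r.1 r.2

def check (region : List Int) (m : Int) : List Int × Int :=
  checkGo region.length region m

-- ===== PORT B =====
-- hand-written bisect_left of Source B: leftmost index in [lo, hi) with s[idx] >= a;
-- fuel = hi - lo bounds the loop (the window shrinks every iteration)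
def firstGeqGo : Nat → List Int → Int → Nat → Nat → Nat
  | 0, _, _, lo, _ => lo
  | fuel + 1, s, a, lo, hi =>
      if lo < hi then
        let mid := (lo + hi) / 2
        if s.getD mid 0 < a then firstGeqGo fuel s a (mid + 1) hi   -- s[mid] exact here: mid < hi ≤ len(s)
        else firstGeqGo fuel s a lo mid
      else lo

def firstGeq (s : List Int) (a : Int) (lo hi : Nat) : Nat :=
  firstGeqGo (hi - lo) s a lo hi

-- the while-loop of Source B, state (idx, m); fuel = n - idx bounds the iterations (idx strictly grows)
def checkAltGo : Nat → List Int → List Int → Nat → Nat → Int → Nat × Int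
  | 0, _, _, _, idx, m => (idx, m)
  | fuel + 1, s, pref, n, idx, m =>
      if idx < n then
        let a := PySem.Int.floordiv m ((n : Int) - (idx : Int))
        let j := firstGeq s a idx s.length
        if j = idx then (idx, m)
        else checkAltGo fuel s pref n j (m - (pref.getD j 0 - pref.getD idx 0))
      else (idx, m)

def check_alt_loop (s pref : List Int) (n : Nat) (idx : Nat) (m : Int) : Nat × Int :=
  checkAltGo (n - idx) s pref n idx m

def check_alt (region : List Int) (m : Int) : List Int × Int :=
  let n := region.length
  let s := PySem.List.sorted region (fun x => x) false
  let pref := s.foldl (fun p x => p ++ [p.getLastD 0 + x]) [0]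
  let r := check_alt_loop s pref n 0 m
  if r.1 = n then ([], r.2)
  else
    let t := s.getD r.1 0      -- s[idx]: exact here, idx < n
    (region.filter (fun x => decide (t ≤ x)), r.2)

-- ===== PRECONDITION & SPEC =====
-- Pre_ excludes only the empty list, on which A raises ZeroDivisionError.
def Pre_check (region : List Int) (m : Int) : Prop := region ≠ []
instance (region : List Int) (m : Int) : Decidable (Pre_check region m) := by unfold Pre_check; infer_instance
def pvWitness_check : List Int × Int := ([1, 3, 5], 6)

-- On the empty list A raises ZeroDivisionError (m // len(region)); B returns ([], m).
def Raises_check (region : List Int) (m : Int) : Prop := region = []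
instance (region : List Int) (m : Int) : Decidable (Raises_check region m) := by unfold Raises_check; infer_instance
def pvRaiseWitness_check : List Int × Int := ([], 7)
def pvRaiseWitnessOut_check : List Int × Int := ([], 7)

def Spec_check (region : List Int) (m : Int) (out : List Int × Int) : Prop := out = check_alt region m
instance (region : List Int) (m : Int) (out : List Int × Int) : Decidable (Spec_check region m out) := by unfold Spec_check; infer_instance

-- ===== CLAIM (what is proved, stated in full; the proofs are below) =====
def Claim_equal_check : Prop := ∀ (region : List Int) (m : Int), Dom_check region m → Pre_check region m → Spec_check region m (check region m)
def Claim_raises_check : Prop := (∀ (region : List Int) (m : Int), Dom_check region m → Raises_check region m → ¬ Pre_check region m) ∧ (Dom_check (pvRaiseWitness_check.1) (pvRaiseWitness_check.2) ∧ Raises_check (pvRaiseWitness_check.1) (pvRaiseWitness_check.2) ∧ check_alt (pvRaiseWitness_check.1) (pvRaiseWitness_check.2) = pvRaiseWitnessOut_check)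

-- ===== LEMMAS AND PROOFS =====

-- A's for-loop keeps the suffix >= a and subtracts the rest from m
theorem checkLoop_eq (a : Int) (xs tmp : List Int) (m : Int) :
    checkLoop a xs tmp m =
      (tmp ++ xs.filter (fun i => decide (a ≤ i)),
       m - (xs.filter (fun i => decide (i < a))).sum) := by
  induction xs generalizing tmp m with
  | nil => simp [checkLoop]
  | cons i rest ih =>
      by_cases h : a > i
      · have h1 : ¬ a ≤ i := by omega
        simp [checkLoop, h, h1, ih]
        omega
      · have h1 : a ≤ i := by omega
        have h2 : ¬ i < a := by omega
        simp [checkLoop, h, h1, ih]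

theorem sorted_getD_mono (s : List Int) (hs : s.Pairwise (· ≤ ·)) :
    ∀ p q : Nat, p ≤ q → q < s.length → s.getD p 0 ≤ s.getD q 0 := by
  intro p q hpq hq
  rw [List.getD_eq_getElem _ _ (by omega), List.getD_eq_getElem _ _ hq]
  rcases Nat.lt_or_ge p q with h | h
  · exact List.pairwise_iff_getElem.mp hs p q (by omega) hq h
  · have : p = q := by omega
    subst this; rfl

-- one-step unfolding equations (definitional)
theorem firstGeqGo_succ (fuel : Nat) (s : List Int) (a : Int) (lo hi : Nat) :
    firstGeqGo (fuel + 1) s a lo hi =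
      if lo < hi then
        (if s.getD ((lo + hi) / 2) 0 < a then firstGeqGo fuel s a ((lo + hi) / 2 + 1) hi
         else firstGeqGo fuel s a lo ((lo + hi) / 2))
      else lo := rfl

theorem checkAltGo_succ (fuel : Nat) (s pref : List Int) (n idx : Nat) (m : Int) :
    checkAltGo (fuel + 1) s pref n idx m =
      if idx < n then
        (if firstGeq s (PySem.Int.floordiv m ((n : Int) - (idx : Int))) idx s.length = idx then (idx, m)
         else checkAltGo fuel s pref n (firstGeq s (PySem.Int.floordiv m ((n : Int) - (idx : Int))) idx s.length)
              (m - (pref.getD (firstGeq s (PySem.Int.floordiv m ((n : Int) - (idx : Int))) idx s.length) 0 -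
                    pref.getD idx 0)))
      else (idx, m) := rfl

theorem checkGo_succ (fuel : Nat) (region : List Int) (m : Int) :
    checkGo (fuel + 1) region m =
      (if region.length = (checkLoop (PySem.Int.floordiv m region.length) region [] m).1.length ∨
          (checkLoop (PySem.Int.floordiv m region.length) region [] m).1.length = 0 then
        checkLoop (PySem.Int.floordiv m region.length) region [] m
       else checkGo fuel (checkLoop (PySem.Int.floordiv m region.length) region [] m).1
              (checkLoop (PySem.Int.floordiv m region.length) region [] m).2) := rfl

theorem firstGeqGo_ge : ∀ (fuel : Nat) (s : List Int) (a : Int) (lo hi : Nat),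
    lo ≤ firstGeqGo fuel s a lo hi := by
  intro fuel
  induction fuel with
  | zero => intro s a lo hi; exact Nat.le_refl _
  | succ fuel ih =>
      intro s a lo hi
      rw [firstGeqGo_succ]
      by_cases h : lo < hi
      · rw [if_pos h]
        by_cases hc : s.getD ((lo + hi) / 2) 0 < a
        · rw [if_pos hc]
          have := ih s a ((lo + hi) / 2 + 1) hi
          omega
        · rw [if_neg hc]
          exact ih s a lo ((lo + hi) / 2)
      · rw [if_neg h]

theorem firstGeq_ge (s : List Int) (a : Int) (lo hi : Nat) : lo ≤ firstGeq s a lo hi :=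
  firstGeqGo_ge (hi - lo) s a lo hi

theorem firstGeqGo_le : ∀ (fuel : Nat) (s : List Int) (a : Int) (lo hi : Nat),
    lo ≤ hi → firstGeqGo fuel s a lo hi ≤ hi := by
  intro fuel
  induction fuel with
  | zero => intro s a lo hi h; exact h
  | succ fuel ih =>
      intro s a lo hi hlh
      rw [firstGeqGo_succ]
      by_cases h : lo < hi
      · rw [if_pos h]
        by_cases hc : s.getD ((lo + hi) / 2) 0 < a
        · rw [if_pos hc]
          exact ih s a ((lo + hi) / 2 + 1) hi (by omega)
        · rw [if_neg hc]
          have := ih s a lo ((lo + hi) / 2) (by omega)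
          omega
      · rw [if_neg h]
        exact hlh

theorem firstGeq_le (s : List Int) (a : Int) (lo hi : Nat) (hlh : lo ≤ hi) :
    firstGeq s a lo hi ≤ hi :=
  firstGeqGo_le (hi - lo) s a lo hi hlh

-- on a sorted list, the binary search finds the split point of the window [lo,hi):
-- < a strictly before the result, ≥ a from the result on
theorem firstGeqGo_spec (s : List Int) (a : Int) (hs : s.Pairwise (· ≤ ·)) :
    ∀ (fuel lo hi : Nat), hi - lo ≤ fuel → hi ≤ s.length → lo ≤ hi →
      (∀ i, lo ≤ i → i < firstGeqGo fuel s a lo hi → s.getD i 0 < a) ∧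
      (∀ i, firstGeqGo fuel s a lo hi ≤ i → i < hi → ¬ s.getD i 0 < a) := by
  intro fuel
  induction fuel with
  | zero =>
      intro lo hi hf hh hlh
      have he : firstGeqGo 0 s a lo hi = lo := rfl
      rw [he]
      exact ⟨fun i h1 h2 => by omega, fun i h1 h2 => by omega⟩
  | succ fuel ih =>
      intro lo hi hf hh hlh
      rw [firstGeqGo_succ]
      by_cases h : lo < hi
      · rw [if_pos h]
        by_cases hc : s.getD ((lo + hi) / 2) 0 < a
        · rw [if_pos hc]
          obtain ⟨ih1, ih2⟩ := ih ((lo + hi) / 2 + 1) hi (by omega) hh (by omega)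
          refine ⟨?_, ih2⟩
          intro i hli hi2
          rcases Nat.lt_or_ge i ((lo + hi) / 2 + 1) with h2 | h2
          · exact lt_of_le_of_lt (sorted_getD_mono s hs i ((lo + hi) / 2) (by omega) (by omega)) hc
          · exact ih1 i h2 hi2
        · rw [if_neg hc]
          obtain ⟨ih1, ih2⟩ := ih lo ((lo + hi) / 2) (by omega) (by omega) (by omega)
          refine ⟨ih1, ?_⟩
          intro i hgi hi2
          rcases Nat.lt_or_ge i ((lo + hi) / 2) with h2 | h2
          · exact ih2 i hgi h2
          · intro hlt2
            exact hc (lt_of_le_of_lt (sorted_getD_mono s hs ((lo + hi) / 2) i h2 (by omega)) hlt2)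
      · rw [if_neg h]
        exact ⟨fun i h1 h2 => by omega, fun i h1 h2 => by omega⟩

theorem firstGeq_spec (s : List Int) (a : Int)
    (hs : s.Pairwise (· ≤ ·)) (lo hi : Nat) (hh : hi ≤ s.length) (hlh : lo ≤ hi) :
    (∀ i, lo ≤ i → i < firstGeq s a lo hi → s.getD i 0 < a) ∧
    (∀ i, firstGeq s a lo hi ≤ i → i < hi → ¬ s.getD i 0 < a) :=
  firstGeqGo_spec s a hs (hi - lo) lo hi (le_refl _) hh hlh

-- checkAltGo ignores extra fuel
theorem checkAltGo_congr (s pref : List Int) (n : Nat) :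
    ∀ (f1 f2 idx : Nat) (m : Int), n - idx ≤ f1 → n - idx ≤ f2 →
      checkAltGo f1 s pref n idx m = checkAltGo f2 s pref n idx m := by
  intro f1
  induction f1 with
  | zero =>
      intro f2 idx m h1 h2
      have hnot : ¬ idx < n := by omega
      cases f2 with
      | zero => rfl
      | succ f2 => rw [checkAltGo_succ, if_neg hnot]; rfl
  | succ f1 ih =>
      intro f2 idx m h1 h2
      by_cases h : idx < n
      · obtain ⟨f2', rfl⟩ : ∃ k, f2 = k + 1 := ⟨f2 - 1, by omega⟩
        rw [checkAltGo_succ, checkAltGo_succ, if_pos h, if_pos h]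
        by_cases hj : firstGeq s (PySem.Int.floordiv m ((n : Int) - (idx : Int))) idx s.length = idx
        · rw [if_pos hj, if_pos hj]
        · rw [if_neg hj, if_neg hj]
          have hge := firstGeq_ge s (PySem.Int.floordiv m ((n : Int) - (idx : Int))) idx s.length
          exact ih f2' _ _ (by omega) (by omega)
      · cases f2 with
        | zero => rw [checkAltGo_succ, if_neg h]; rfl
        | succ f2 => rw [checkAltGo_succ, checkAltGo_succ, if_neg h, if_neg h]

-- the wrapper's one-step unfolding
theorem alt_loop_unfold (s pref : List Int) (n idx : Nat) (m : Int) :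
    check_alt_loop s pref n idx m =
      (if idx < n then
        (if firstGeq s (PySem.Int.floordiv m ((n : Int) - (idx : Int))) idx s.length = idx then (idx, m)
         else check_alt_loop s pref n (firstGeq s (PySem.Int.floordiv m ((n : Int) - (idx : Int))) idx s.length)
              (m - (pref.getD (firstGeq s (PySem.Int.floordiv m ((n : Int) - (idx : Int))) idx s.length) 0 -
                    pref.getD idx 0)))
      else (idx, m)) := by
  by_cases h : idx < n
  · obtain ⟨f, hf⟩ : ∃ f, n - idx = f + 1 := ⟨n - idx - 1, by omega⟩
    unfold check_alt_loop
    rw [hf, checkAltGo_succ, if_pos h, if_pos h]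
    by_cases hj : firstGeq s (PySem.Int.floordiv m ((n : Int) - (idx : Int))) idx s.length = idx
    · rw [if_pos hj, if_pos hj]
    · rw [if_neg hj, if_neg hj]
      have hge := firstGeq_ge s (PySem.Int.floordiv m ((n : Int) - (idx : Int))) idx s.length
      exact checkAltGo_congr s pref n f _ _ _ (by omega) (le_refl _)
  · unfold check_alt_loop
    have h0 : n - idx = 0 := by omega
    rw [h0, if_neg h]
    rfl

-- checkGo ignores extra fuel
theorem checkGo_congr : ∀ (f1 f2 : Nat) (cur : List Int) (m : Int),
    cur.length ≤ f1 → cur.length ≤ f2 → checkGo f1 cur m = checkGo f2 cur m := by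
  intro f1
  induction f1 with
  | zero =>
      intro f2 cur m h1 h2
      have hnil : cur = [] := List.eq_nil_of_length_eq_zero (by omega)
      subst hnil
      cases f2 with
      | zero => rfl
      | succ f2 => rfl
  | succ f1 ih =>
      intro f2 cur m h1 h2
      cases f2 with
      | zero =>
          have hnil : cur = [] := List.eq_nil_of_length_eq_zero (by omega)
          subst hnil
          rfl
      | succ f2 =>
          rw [checkGo_succ, checkGo_succ]
          by_cases hc : cur.length = (checkLoop (PySem.Int.floordiv m cur.length) cur [] m).1.length ∨
              (checkLoop (PySem.Int.floordiv m cur.length) cur [] m).1.length = 0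
          · rw [if_pos hc, if_pos hc]
          · rw [if_neg hc, if_neg hc]
            have hb : (checkLoop (PySem.Int.floordiv m cur.length) cur [] m).1.length ≤ cur.length := by
              rw [checkLoop_eq]
              simpa using List.length_filter_le _ _
            rw [not_or] at hc
            exact ih f2 _ _ (by omega) (by omega)

-- the prefix-sum list built by Source B's for-loop
theorem pref_eq (s : List Int) :
    s.foldl (fun p x => p ++ [p.getLastD 0 + x]) [0] =
      (List.range (s.length + 1)).map (fun i => (s.take i).sum) := by
  induction s using List.reverseRecOn with
  | nil => simp
  | append_singleton t x ih =>
      rw [List.foldl_append, ih, List.foldl_cons, List.foldl_nil]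
      have h1 : ((List.range (t.length + 1)).map (fun i => (t.take i).sum)).getLastD 0 = t.sum := by
        rw [List.range_succ, List.map_append, List.map_singleton, List.getLastD_concat]
        simp
      rw [h1]
      have h2 : (t ++ [x]).length + 1 = (t.length + 1) + 1 := by simp
      rw [h2]
      conv_rhs => rw [List.range_succ, List.map_append, List.map_singleton]
      congr 1
      · apply List.map_congr_left
        intro i hi
        have hle : i ≤ t.length := Nat.lt_succ_iff.mp (List.mem_range.mp hi)
        rw [List.take_append_of_le_length hle]
      · have h3 : (t ++ [x]).take (t.length + 1) = t ++ [x] := by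
          apply List.take_of_length_le
          simp
        rw [h3, List.sum_append]
        simp

theorem pref_getD (s : List Int) (j : Nat) (hj : j ≤ s.length) :
    (s.foldl (fun p x => p ++ [p.getLastD 0 + x]) [0]).getD j 0 = (s.take j).sum := by
  rw [pref_eq, List.getD_eq_getElem _ _ (by simpa using by omega)]
  simp

theorem alt_loop_bounds (s pref : List Int) (n : Nat) (hn : n = s.length) :
    ∀ (fuel idx : Nat) (m : Int), n - idx ≤ fuel → idx ≤ n →
      idx ≤ (check_alt_loop s pref n idx m).1 ∧ (check_alt_loop s pref n idx m).1 ≤ n := by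
  intro fuel
  induction fuel with
  | zero =>
      intro idx m h1 h2
      rw [alt_loop_unfold]
      have : ¬ idx < n := by omega
      rw [if_neg this]
      omega
  | succ fuel ih =>
      intro idx m h1 h2
      rw [alt_loop_unfold]
      by_cases h : idx < n
      · rw [if_pos h]
        by_cases hj : firstGeq s (PySem.Int.floordiv m ((n : Int) - (idx : Int))) idx s.length = idx
        · rw [if_pos hj]
          omega
        · rw [if_neg hj]
          have hge := firstGeq_ge s (PySem.Int.floordiv m ((n : Int) - (idx : Int))) idx s.length
          have hle := firstGeq_le s (PySem.Int.floordiv m ((n : Int) - (idx : Int))) idx s.length (by omega)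
          have := ih (firstGeq s (PySem.Int.floordiv m ((n : Int) - (idx : Int))) idx s.length)
            (m - (pref.getD (firstGeq s (PySem.Int.floordiv m ((n : Int) - (idx : Int))) idx s.length) 0 - pref.getD idx 0)) (by omega) (by omega)
          omega
      · rw [if_neg h]
        omega

-- every element of a tail of the sorted array is ≥ the value at the cut
theorem mem_drop_ge_getD (s : List Int) (hs : s.Pairwise (· ≤ ·)) (j : Nat) (hj : j < s.length) :
    ∀ x ∈ s.drop j, s.getD j 0 ≤ x := by
  intro x hx
  have hpair : (s.drop j).Pairwise (· ≤ ·) := List.Pairwise.sublist (List.drop_sublist j s) hs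
  rw [List.getD_eq_getElem _ _ hj]
  have hcons : s.drop j = s[j] :: s.drop (j + 1) := List.drop_eq_getElem_cons hj
  rw [hcons] at hx hpair
  rcases List.mem_cons.mp hx with h | h
  · exact le_of_eq h.symm
  · exact (List.pairwise_cons.mp hpair).1 x h

-- one unfolded round of A
theorem checkGo_round : ∀ (fuel : Nat) (cur : List Int) (m : Int), cur.length ≤ fuel →
    checkGo fuel cur m =
      (let a := PySem.Int.floordiv m cur.length;
       let K := cur.filter (fun i => decide (a ≤ i));
       let m1 := m - (cur.filter (fun i => decide (i < a))).sum;
       if cur.length = K.length ∨ K.length = 0 then (K, m1) else check K m1) := by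
  intro fuel cur m hf
  cases fuel with
  | zero =>
      have hnil : cur = [] := List.eq_nil_of_length_eq_zero (by omega)
      subst hnil
      simp [checkGo]
  | succ fuel =>
      rw [checkGo_succ]
      simp only [checkLoop_eq, List.nil_append]
      by_cases hc : cur.length = (cur.filter (fun i => decide (PySem.Int.floordiv m cur.length ≤ i))).length ∨
          (cur.filter (fun i => decide (PySem.Int.floordiv m cur.length ≤ i))).length = 0
      · rw [if_pos hc, if_pos hc]
      · rw [if_neg hc, if_neg hc]
        rw [not_or] at hc
        have hb : (cur.filter (fun i => decide (PySem.Int.floordiv m cur.length ≤ i))).length ≤ cur.length :=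
          List.length_filter_le _ _
        exact checkGo_congr fuel _ _ _ (by omega) (le_refl _)

-- one unfolded round of A
theorem check_round (cur : List Int) (m : Int) :
    check cur m =
      (let a := PySem.Int.floordiv m cur.length;
       let K := cur.filter (fun i => decide (a ≤ i));
       let m1 := m - (cur.filter (fun i => decide (i < a))).sum;
       if cur.length = K.length ∨ K.length = 0 then (K, m1) else check K m1) :=
  checkGo_round cur.length cur m (le_refl _)

-- MAIN SIMULATION LEMMA: Source B's while-loop, run from cut position idx on the sorted array,
-- finishes A's recursion on the current survivor list cur
theorem sim_main (s pref : List Int) (hs : s.Pairwise (· ≤ ·))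
    (hpref : ∀ j, j ≤ s.length → pref.getD j 0 = (s.take j).sum)
    (n : Nat) (hn : n = s.length) :
    ∀ (fuel : Nat) (idx : Nat) (cur : List Int) (m : Int), n - idx ≤ fuel →
      cur ≠ [] → idx + cur.length = n →
      s.drop idx = PySem.List.sorted cur (fun x => x) false →
      check cur m =
        (let r := check_alt_loop s pref n idx m;
         if r.1 = n then ([], r.2)
         else (cur.filter (fun x => decide (s.getD r.1 0 ≤ x)), r.2)) := by
  intro fuel
  induction fuel with
  | zero =>
      intro idx cur m hfuel hcur hlen _
      exfalso
      have : cur.length ≠ 0 := fun h => hcur (List.eq_nil_of_length_eq_zero h)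
      omega
  | succ fuel ih =>
      intro idx cur m hfuel hcur hlen hdrop
      have hcl : 0 < cur.length := List.length_pos_iff.mpr hcur
      have hidx : idx < n := by omega
      have hperm : (s.drop idx).Perm cur := by
        rw [hdrop]; exact PySem.List.sorted_perm cur (fun x => x) false
      -- the two thresholds agree
      have hcast : ((n : Int) - (idx : Int)) = (cur.length : Int) := by
        omega
      set a := PySem.Int.floordiv m (cur.length : Int) with ha
      set j := firstGeq s a idx s.length with hjdef
      have hj1 : idx ≤ j := firstGeq_ge s a idx s.length
      have hj2 : j ≤ n := by
        have := firstGeq_le s a idx s.length (by omega)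
        omega
      obtain ⟨hlt, hge⟩ := firstGeq_spec s a hs idx s.length (le_refl _) (by omega)
      rw [← hjdef] at hlt hge
      -- decompose the tail at j
      have hdropdrop : (s.drop idx).drop (j - idx) = s.drop j := by
        rw [List.drop_drop]
        congr 1
        omega
      have hsplit : s.drop idx = (s.drop idx).take (j - idx) ++ s.drop j := by
        rw [← hdropdrop, List.take_append_drop]
      set E := (s.drop idx).take (j - idx) with hE
      have hElen : E.length = j - idx := by
        rw [hE]
        simp
        omega
      -- every element of E is < a, every element of s.drop j is ≥ a
      have hEmem : ∀ x ∈ E, x < a := by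
        intro x hx
        obtain ⟨p, hp, hpx⟩ := List.mem_iff_getElem.mp hx
        have hp2 : p < j - idx := by omega
        have hlt2 : idx + p < s.length := by omega
        have : E[p]'hp = s[idx + p]'hlt2 := by
          simp [hE, List.getElem_take, List.getElem_drop]
        rw [this] at hpx
        have := hlt (idx + p) (by omega) (by omega)
        rw [List.getD_eq_getElem _ _ hlt2] at this
        omega
      have hDmem : ∀ x ∈ s.drop j, a ≤ x := by
        intro x hx
        obtain ⟨p, hp, hpx⟩ := List.mem_iff_getElem.mp hx
        have hlen2 : (s.drop j).length = s.length - j := by simp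
        have hlt2 : j + p < s.length := by omega
        have : (s.drop j)[p] = s[j + p]'hlt2 := List.getElem_drop
        rw [this] at hpx
        have := hge (j + p) (by omega) (by omega)
        rw [List.getD_eq_getElem _ _ hlt2] at this
        omega
      -- the removed part and kept part of cur, via the permutation
      have hremperm : (cur.filter (fun i => decide (i < a))).Perm E := by
        have h1 := (hperm.symm).filter (fun i => decide (i < a))
        have h2 : (s.drop idx).filter (fun i => decide (i < a)) = E := by
          rw [hsplit, List.filter_append]
          have hEf : E.filter (fun i => decide (i < a)) = E :=
            List.filter_eq_self.mpr (fun x hx => by simpa using hEmem x hx)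
          have hDf : (s.drop j).filter (fun i => decide (i < a)) = [] :=
            List.filter_eq_nil_iff.mpr (fun x hx => by simpa using not_lt.mpr (hDmem x hx))
          rw [hEf, hDf, List.append_nil]
        rw [h2] at h1
        exact h1
      have hkeepperm : (cur.filter (fun i => decide (a ≤ i))).Perm (s.drop j) := by
        have h1 := (hperm.symm).filter (fun i => decide (a ≤ i))
        have h2 : (s.drop idx).filter (fun i => decide (a ≤ i)) = s.drop j := by
          rw [hsplit, List.filter_append]
          have hEf : E.filter (fun i => decide (a ≤ i)) = [] :=
            List.filter_eq_nil_iff.mpr (fun x hx => by simpa using not_le.mpr (hEmem x hx))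
          have hDf : (s.drop j).filter (fun i => decide (a ≤ i)) = s.drop j :=
            List.filter_eq_self.mpr (fun x hx => by simpa using hDmem x hx)
          rw [hEf, hDf, List.nil_append]
        rw [h2] at h1
        exact h1
      have hKlen : (cur.filter (fun i => decide (a ≤ i))).length = n - j := by
        rw [hkeepperm.length_eq]
        simp
        omega
      have hremlen : (cur.filter (fun i => decide (i < a))).length = j - idx := by
        rw [hremperm.length_eq, hElen]
      -- removed sum = prefix-sum difference
      have hEsum : E.sum = (s.take j).sum - (s.take idx).sum := by
        have : s.take j = s.take idx ++ E := by
          rw [hE]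
          have : j = idx + (j - idx) := by omega
          rw [this, List.take_add]
          have h4 : idx + (j - idx) - idx = j - idx := by omega
          rw [h4]
        rw [this, List.sum_append]
        ring
      have hremsum : (cur.filter (fun i => decide (i < a))).sum = pref.getD j 0 - pref.getD idx 0 := by
        rw [hremperm.sum_eq, hEsum, hpref j (by omega), hpref idx (by omega)]
      -- unfold one step of the B loop
      rw [check_round]
      simp only
      rw [alt_loop_unfold]
      rw [if_pos hidx]
      simp only [hcast, ← ha, ← hjdef]
      by_cases hji : j = idx
      · -- nothing removed this round: both sides return cur (and m unchanged)
        rw [if_pos hji]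
        have hcond : cur.length = (cur.filter (fun i => decide (a ≤ i))).length := by omega
        rw [if_pos (Or.inl hcond)]
        have hKall : cur.filter (fun i => decide (a ≤ i)) = cur := by
          apply List.filter_eq_self.mpr
          intro x hx
          simp only [decide_eq_true_eq]
          exact hDmem x (by rw [hji]; exact hperm.symm.mem_iff.mp hx)
        have hrem0 : (cur.filter (fun i => decide (i < a))).sum = 0 := by
          have h0 : cur.filter (fun i => decide (i < a)) = [] :=
            List.eq_nil_of_length_eq_zero (by omega)
          rw [h0]; rfl
        have hidxn : ¬ (idx = n) := by omega
        rw [if_neg hidxn]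
        have hfall : cur.filter (fun x => decide (s.getD idx 0 ≤ x)) = cur := by
          apply List.filter_eq_self.mpr
          intro x hx
          simp only [decide_eq_true_eq]
          exact mem_drop_ge_getD s hs idx (by omega) x (hperm.symm.mem_iff.mp hx)
        rw [hKall, hrem0, hfall]
        simp
      · have hjlt : idx < j := by omega
        rw [if_neg hji]
        rw [← hremsum]
        by_cases hjn : j = n
        · -- everything removed: both sides return ([], m - removed)
          have hK0 : (cur.filter (fun i => decide (a ≤ i))).length = 0 := by omega
          rw [if_pos (Or.inr hK0)]
          have hKnil : cur.filter (fun i => decide (a ≤ i)) = [] :=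
            List.eq_nil_of_length_eq_zero hK0
          rw [alt_loop_unfold]
          have : ¬ (j < n) := by omega
          rw [if_neg this, if_pos hjn, hKnil]
        · -- recurse: apply the induction hypothesis at cut j
          have hKlen0 : (cur.filter (fun i => decide (a ≤ i))).length ≠ 0 := by omega
          have hcurK : ¬ (cur.length = (cur.filter (fun i => decide (a ≤ i))).length) := by omega
          rw [if_neg (not_or.mpr ⟨hcurK, hKlen0⟩)]
          set K := cur.filter (fun i => decide (a ≤ i)) with hKdef
          have hKne : K ≠ [] := fun h => hKlen0 (by rw [h]; rfl)
          have hdropj : s.drop j = PySem.List.sorted K (fun x => x) false := by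
            have hsorted : (s.drop j).Pairwise (· ≤ ·) := List.Pairwise.sublist (List.drop_sublist j s) hs
            exact (PySem.List.sorted_id_eq_of_perm_of_pairwise K (s.drop j) hkeepperm.symm hsorted).symm
          have := ih j K (m - (List.filter (fun i => decide (i < a)) cur).sum) (by omega) hKne (by omega) hdropj
          rw [this]
          simp only
          set r := check_alt_loop s pref n j (m - (List.filter (fun i => decide (i < a)) cur).sum) with hrdef
          by_cases hrn : r.1 = n
          · rw [if_pos hrn, if_pos hrn]
          · rw [if_neg hrn, if_neg hrn]
            -- survivors filter collapses: s[r.1] ≥ a, so filtering cur by it equals filtering K by it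
            have hb := alt_loop_bounds s pref n hn (n - j) j
              (m - (List.filter (fun i => decide (i < a)) cur).sum) (le_refl _) (by omega)
            rw [← hrdef] at hb
            have hr1 : j ≤ r.1 := hb.1
            have hr1n : r.1 < n := by omega
            have hta : a ≤ s.getD r.1 0 := by
              have h1 : a ≤ s.getD j 0 := by
                have := hge j (le_refl _) (by omega)
                omega
              have h2 := sorted_getD_mono s hs j r.1 hr1 (by omega)
              omega
            have hfilt : cur.filter (fun x => decide (s.getD r.1 0 ≤ x)) =
                K.filter (fun x => decide (s.getD r.1 0 ≤ x)) := by
              rw [hKdef, List.filter_filter]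
              apply List.filter_congr
              intro x hx
              by_cases hxt : s.getD r.1 0 ≤ x
              · have hax : a ≤ x := le_trans hta hxt
                simp [hax]
              · simp
                rw [List.getD_eq_getElem?_getD] at hta
                exact fun h2x => le_trans hta h2x
            rw [hfilt]

-- ===== VERDICT (by name: the statement is the Claim_ definition above) =====
theorem check_spec : Claim_equal_check := by
  intro region m _ hpre
  unfold Spec_check
  unfold Pre_check at hpre
  set s := PySem.List.sorted region (fun x => x) false with hsdef
  have hs : s.Pairwise (· ≤ ·) := by
    have := PySem.List.sorted_pairwise (xs := region) (key := fun x => x)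
    simpa using this
  have hslen : s.length = region.length := by
    rw [hsdef]
    exact (PySem.List.sorted_perm region (fun x => x) false).length_eq
  have hmain := sim_main s (s.foldl (fun p x => p ++ [p.getLastD 0 + x]) [0]) hs
    (fun j hj => pref_getD s j hj) region.length hslen.symm
    region.length 0 region m (by omega) hpre (by omega) (by simpa using hsdef.symm)
  unfold check_alt
  simp only
  rw [hmain]

@[simp] theorem check_raises : Claim_raises_check := by
  unfold Claim_raises_check
  exact ⟨fun r m _ h hp => hp h, by decide⟩
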